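-- pv_equiv track=rewrite | github.com/57Darling02/RailGraph2Gurobi | docs/最新版毕设程序（未加滚动时域）/timetable_utils.py | get_same_sub_route
-- ===== SOURCE A (Python) =====
-- def get_same_sub_route(route1, route2):
--     same_sub_route = []
--     subRoute = []
--     for s in route1:
--         if s in route2:
--             subRoute.append(s)
--     for i in range(len(subRoute)):
--         s = subRoute[i]
--         j = i+1
--         if j >= len(subRoute): break
--         s_next = subRoute[j]
--         indexOfS_R1 = route1.index(s)
--         indexOfS_next_R1 = route1.index(s_next)
--         indexOfS_R2 = route2.index(s)
--         indexOfS_next_R2 = route2.index(s_next)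
--         if (indexOfS_next_R1-indexOfS_R1 == 1) and (indexOfS_next_R2-indexOfS_R2 == 1):
--             same_sub_route.append((s,s_next))
--     return same_sub_route
-- ===== SOURCE B (Python) =====
-- def get_same_sub_route(route1, route2):
--     # first-occurrence index of every element in each route
--     first1 = {}
--     for i, s in enumerate(route1):
--         if s not in first1:
--             first1[s] = i
--     first2 = {}
--     for i, s in enumerate(route2):
--         if s not in first2:
--             first2[s] = i
--     # succ[s] = t  when the edge (s, t) is a first-occurrence adjacency in BOTH
--     # routes (t sits right after s's first occurrence in route1 and in route2);
--     # such a t is unique per s, so one scan of route1's edges finds them all.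
--     succ = {}
--     for s, t in zip(route1, route1[1:]):
--         if (s in first2 and t in first2
--                 and first1[t] == first1[s] + 1
--                 and first2[t] == first2[s] + 1):
--             succ[s] = t
--     # stream route1 once, remembering the previous element common to route2,
--     # emitting the pair whenever the common successor follows it
--     out = []
--     prev = None
--     has_prev = False
--     for s in route1:
--         if s in first2:
--             if has_prev and succ.get(prev) == s:
--                 out.append((prev, s))
--             prev = s
--             has_prev = True
--     return out
-- ===== Notes on version B (the rewrite author's own statement) =====
-- stated objective: faster
-- what changed: B never builds A's filtered subRoute list nor calls list.index: it precomputes first-occurrence dicts, derives a successor map of edges adjacent in both routes from a single scan of route1's consecutive pairs, then streams route1 once emitting a pair whenever the remembered previous common element's successor arrives.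
import Mathlib
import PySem

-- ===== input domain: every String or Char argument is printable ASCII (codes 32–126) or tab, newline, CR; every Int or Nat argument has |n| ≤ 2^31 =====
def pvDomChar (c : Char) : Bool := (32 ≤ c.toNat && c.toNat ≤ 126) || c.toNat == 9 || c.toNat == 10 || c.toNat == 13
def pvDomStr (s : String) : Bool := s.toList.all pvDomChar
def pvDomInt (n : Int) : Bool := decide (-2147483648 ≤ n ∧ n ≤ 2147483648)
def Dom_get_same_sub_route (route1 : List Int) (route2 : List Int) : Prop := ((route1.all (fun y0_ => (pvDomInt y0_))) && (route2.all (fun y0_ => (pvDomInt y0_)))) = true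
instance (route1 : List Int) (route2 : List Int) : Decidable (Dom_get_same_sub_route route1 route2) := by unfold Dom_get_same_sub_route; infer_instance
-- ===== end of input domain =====

-- B replaces A's filter-then-index algorithm by a successor map of edges adjacent in both
-- routes plus one streaming pass over route1 (objective: faster, no repeated `.index` scans).


-- ===== PORT A =====
-- Second loop of A: `for i in range(len(subRoute)): … j = i+1; if j >= len(subRoute): break …`.
-- `route1.index(s)` etc. never raise here: s and s_next come from subRoute, whose elements
-- lie in both routes, so `.getD 0` on `index?` is exact (the `some` case always applies).
def pvALoop (route1 route2 sub : List Int) (i : Nat) (acc : List (List Int)) : List (List Int) :=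
  if i < sub.length then
    let s := PySem.List.pyGetD sub (i : Int) 0
    if sub.length ≤ i + 1 then acc
    else
      let s_next := PySem.List.pyGetD sub ((i : Int) + 1) 0
      let indexOfS_R1 : Int := ((PySem.List.index? route1 s).getD 0 : Nat)
      let indexOfS_next_R1 : Int := ((PySem.List.index? route1 s_next).getD 0 : Nat)
      let indexOfS_R2 : Int := ((PySem.List.index? route2 s).getD 0 : Nat)
      let indexOfS_next_R2 : Int := ((PySem.List.index? route2 s_next).getD 0 : Nat)
      if (indexOfS_next_R1 - indexOfS_R1 == 1) && (indexOfS_next_R2 - indexOfS_R2 == 1) then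
        pvALoop route1 route2 sub (i + 1) (acc ++ [[s, s_next]])
      else
        pvALoop route1 route2 sub (i + 1) acc
  else acc
termination_by sub.length - i

def get_same_sub_route (route1 : List Int) (route2 : List Int) : List (List Int) :=
  let subRoute := route1.foldl (fun acc s => if route2.contains s then acc ++ [s] else acc) []
  pvALoop route1 route2 subRoute 0 []

-- ===== PORT B =====
-- first-occurrence index dict: `for i, s in enumerate(r): if s not in first: first[s] = i`
def pvFirstIdx (r : List Int) : PySem.Dict Int Int :=
  (PySem.List.enumerate r).foldl
    (fun d p => if d.contains p.2 then d else d.insert p.2 p.1) PySem.Dict.empty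

-- the `if` condition of B's successor-building loop, as a named predicate on the edge
def pvSuccP (first1 first2 : PySem.Dict Int Int) (p : Int × Int) : Bool :=
  first2.contains p.1 && first2.contains p.2 &&
    (first1.getD p.2 0 == first1.getD p.1 0 + 1) &&
    (first2.getD p.2 0 == first2.getD p.1 0 + 1)

-- `for s, t in zip(route1, route1[1:]): if …: succ[s] = t`
-- (`first1[t]` etc. never raise: s, t are route1 elements, and the route2 lookups are
--  guarded by the `in first2` conjuncts, so `.getD 0` is exact)
def pvSucc (first1 first2 : PySem.Dict Int Int) (route1 : List Int) : PySem.Dict Int Int :=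
  (route1.zip (route1.drop 1)).foldl
    (fun d p => if pvSuccP first1 first2 p then d.insert p.1 p.2 else d) PySem.Dict.empty

def get_same_sub_route_alt (route1 : List Int) (route2 : List Int) : List (List Int) :=
  let first1 := pvFirstIdx route1
  let first2 := pvFirstIdx route2
  let succ := pvSucc first1 first2 route1
  -- `prev = None; has_prev = False; for s in route1: …` — (prev, has_prev) as Option Int
  (route1.foldl
    (fun st s =>
      if first2.contains s then
        (st.1 ++ (match st.2 with
          | some p => if succ.get? p == some s then [[p, s]] else []
          | none => []), some s)
      else st)
    (([] : List (List Int)), (none : Option Int))).1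

-- ===== PRECONDITION & SPEC =====
def Spec_get_same_sub_route (route1 : List Int) (route2 : List Int) (out : List (List Int)) : Prop := out = get_same_sub_route_alt route1 route2
instance (route1 : List Int) (route2 : List Int) (out : List (List Int)) : Decidable (Spec_get_same_sub_route route1 route2 out) := by unfold Spec_get_same_sub_route; infer_instance

-- ===== CLAIM (what is proved, stated in full; the proofs are below) =====
def Claim_equal_get_same_sub_route : Prop := ∀ (route1 : List Int) (route2 : List Int), Dom_get_same_sub_route route1 route2 → Spec_get_same_sub_route route1 route2 (get_same_sub_route route1 route2)

-- ===== LEMMAS AND PROOFS =====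

-- A's index arithmetic for a candidate pair, as one predicate
def pvCond (route1 route2 : List Int) (s t : Int) : Bool :=
  (((PySem.List.index? route1 t).getD 0 : Nat) - (((PySem.List.index? route1 s).getD 0 : Nat) : Int) == 1) &&
  (((PySem.List.index? route2 t).getD 0 : Nat) - (((PySem.List.index? route2 s).getD 0 : Nat) : Int) == 1)

-- the pairs A's second loop collects, as a chain recursion over the filtered list
def pvPairs (route1 route2 : List Int) : List Int → List (List Int)
  | [] => []
  | [_] => []
  | s :: t :: r => (if pvCond route1 route2 s t then [[s, t]] else []) ++ pvPairs route1 route2 (t :: r)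

-- the pairs B's streaming loop emits, as a chain recursion carrying the previous element
def pvChain (succ : PySem.Dict Int Int) : Option Int → List Int → List (List Int)
  | _, [] => []
  | prev, x :: xs =>
      (match prev with
       | some p => if succ.get? p == some x then [[p, x]] else []
       | none => []) ++ pvChain succ (some x) xs

-- ---- first-occurrence dict = index? ----
theorem pvFirstIdx_aux (r : List Int) (k : Int) (d : PySem.Dict Int Int) (s : Int) :
    ((PySem.List.enumerate r k).foldl
        (fun d p => if d.contains p.2 then d else d.insert p.2 p.1) d).get? s =
      (if d.contains s then d.get? s
       else (PySem.List.index? r s).map (fun n : Nat => k + n)) := by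
  induction r generalizing k d with
  | nil =>
    rw [PySem.List.enumerate_nil, List.foldl_nil]
    by_cases hs : d.contains s
    · rw [if_pos hs]
    · rw [if_neg hs, (PySem.List.index?_eq_none_iff _ _).mpr (by simp), Option.map_none,
        (PySem.Dict.get?_eq_none_iff_contains _ _).mpr (by simpa using hs)]
  | cons x r ih =>
    rw [PySem.List.enumerate_cons, List.foldl_cons]
    by_cases hcx : d.contains x
    · simp only [hcx, if_true]
      rw [ih]
      by_cases hs : d.contains s
      · rw [if_pos hs, if_pos hs]
      · have hxs : x ≠ s := fun h => hs (h ▸ hcx)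
        rw [if_neg hs, if_neg hs, PySem.List.index?_cons_of_ne r hxs, Option.map_map]
        cases PySem.List.index? r s with
        | none => rfl
        | some n => simp only [Option.map_some, Function.comp_apply]; push_cast; ring_nf
    · simp only [Bool.not_eq_true] at hcx
      simp only [hcx, Bool.false_eq_true, if_false]
      rw [ih]
      by_cases hsx : s = x
      · subst hsx
        rw [if_pos (PySem.Dict.contains_insert_self d s k), PySem.Dict.get?_insert_self,
            if_neg (by simpa using hcx), PySem.List.index?_cons_self]
        simp
      · rw [PySem.Dict.contains_insert, PySem.Dict.get?_insert_of_ne _ _ hsx]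
        have hb : (s == x) = false := by simpa using hsx
        rw [hb, Bool.false_or]
        by_cases hs : d.contains s
        · rw [if_pos hs, if_pos hs]
        · rw [if_neg hs, if_neg hs, PySem.List.index?_cons_of_ne r (Ne.symm hsx), Option.map_map]
          cases PySem.List.index? r s with
          | none => rfl
          | some n => simp only [Option.map_some, Function.comp_apply]; push_cast; ring_nf

theorem pvFirstIdx_get? (r : List Int) (s : Int) :
    (pvFirstIdx r).get? s = (PySem.List.index? r s).map (fun n : Nat => (n : Int)) := by
  rw [pvFirstIdx, pvFirstIdx_aux, if_neg (by rw [PySem.Dict.contains_empty]; simp)]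
  cases PySem.List.index? r s with
  | none => rfl
  | some n => simp

theorem pvFirstIdx_getD (r : List Int) (s : Int) :
    (pvFirstIdx r).getD s 0 = (((PySem.List.index? r s).getD 0 : Nat) : Int) := by
  rw [PySem.Dict.getD_eq_get?_getD, pvFirstIdx_get?]
  cases PySem.List.index? r s with
  | none => rfl
  | some n => simp

theorem pvFirstIdx_contains (r : List Int) (s : Int) :
    (pvFirstIdx r).contains s = r.contains s := by
  rw [PySem.Dict.contains_eq_isSome_get?, pvFirstIdx_get?]
  cases hi : PySem.List.index? r s with
  | none =>
    have hm : s ∉ r := (PySem.List.index?_eq_none_iff r s).mp hi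
    simp [hm]
  | some n =>
    have hm : s ∈ r := (PySem.List.index?_isSome_iff r s).mp (by rw [hi]; rfl)
    simp [hm]

-- ---- generic lemmas about the conditional-insert fold ----
theorem pvFold_preserve (P : Int × Int → Bool) (l : List (Int × Int)) (d : PySem.Dict Int Int)
    (s t : Int) (hd : d.get? s = some t)
    (hu : ∀ u, (s, u) ∈ l → P (s, u) = true → u = t) :
    ((l.foldl (fun d p => if P p then d.insert p.1 p.2 else d) d).get? s = some t) := by
  induction l generalizing d with
  | nil => simpa using hd
  | cons a l ih =>
    rw [List.foldl_cons]
    refine ih _ ?_ (fun u hu' hP => hu u (List.mem_cons_of_mem a hu') hP)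
    by_cases hP : P a
    · rw [if_pos hP]
      by_cases hk : a.1 = s
      · have ha : a = (s, a.2) := by rw [← hk]
        have ht : a.2 = t := hu a.2 (by rw [← ha]; exact List.mem_cons_self ..) (by rw [← ha]; exact hP)
        rw [hk, ht, PySem.Dict.get?_insert_self]
      · rw [PySem.Dict.get?_insert_of_ne _ _ (fun h => hk h.symm)]
        exact hd
    · rw [if_neg hP]; exact hd

theorem pvFold_some (P : Int × Int → Bool) (l : List (Int × Int)) (d : PySem.Dict Int Int)
    (s t : Int) (hmem : (s, t) ∈ l) (hP : P (s, t) = true)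
    (hu : ∀ u, (s, u) ∈ l → P (s, u) = true → u = t) :
    ((l.foldl (fun d p => if P p then d.insert p.1 p.2 else d) d).get? s = some t) := by
  induction l generalizing d with
  | nil => cases hmem
  | cons a l ih =>
    rw [List.foldl_cons]
    rcases List.mem_cons.mp hmem with ha | hl'
    · subst ha
      rw [if_pos hP]
      exact pvFold_preserve P l _ s t (PySem.Dict.get?_insert_self _ _ _)
        (fun u hu' hPu => hu u (List.mem_cons_of_mem _ hu') hPu)
    · exact ih _ hl' (fun u hu' hPu => hu u (List.mem_cons_of_mem _ hu') hPu)

theorem pvFold_mem (P : Int × Int → Bool) (l : List (Int × Int)) (d : PySem.Dict Int Int)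
    (s t : Int)
    (h : (l.foldl (fun d p => if P p then d.insert p.1 p.2 else d) d).get? s = some t) :
    d.get? s = some t ∨ ((s, t) ∈ l ∧ P (s, t) = true) := by
  induction l generalizing d with
  | nil => left; simpa using h
  | cons a l ih =>
    rw [List.foldl_cons] at h
    rcases ih _ h with hstep | ⟨hm, hP⟩
    · by_cases hP : P a
      · rw [if_pos hP] at hstep
        by_cases hk : a.1 = s
        · right
          have ha2 : a.2 = t := by
            rw [hk] at hstep
            simpa [PySem.Dict.get?_insert_self] using hstep
          refine ⟨?_, ?_⟩
          · have : a = (s, t) := by rw [← hk, ← ha2]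
            rw [← this]; exact List.mem_cons_self ..
          · have : a = (s, t) := by rw [← hk, ← ha2]
            rw [← this]; exact hP
        · rw [PySem.Dict.get?_insert_of_ne _ _ (fun hh => hk hh.symm)] at hstep
          exact Or.inl hstep
      · rw [if_neg hP] at hstep; exact Or.inl hstep
    · exact Or.inr ⟨List.mem_cons_of_mem a hm, hP⟩

-- ---- adjacent elements of a list are edges of its zip with its tail ----
theorem pvMemZipDrop (l : List Int) (k : Nat) (h : k + 1 < l.length) :
    (l[k], l[k + 1]) ∈ l.zip (l.drop 1) := by
  have hk : k < (l.zip (l.drop 1)).length := by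
    rw [List.length_zip, List.length_drop]; omega
  have : (l.zip (l.drop 1))[k] = (l[k], l[k + 1]) := by
    rw [List.getElem_zip, List.getElem_drop]
    congr 1
    simp only [Nat.add_comm 1 k]
  exact this ▸ List.getElem_mem hk

-- ---- the successor map holds s ↦ t exactly when A's index condition holds ----
theorem pvSucc_get? (route1 route2 : List Int) (s t : Int)
    (hs1 : s ∈ route1) (hs2 : s ∈ route2) (ht1 : t ∈ route1) (ht2 : t ∈ route2) :
    ((pvSucc (pvFirstIdx route1) (pvFirstIdx route2) route1).get? s = some t)
      ↔ pvCond route1 route2 s t = true := by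
  obtain ⟨k, hk⟩ := Option.isSome_iff_exists.mp ((PySem.List.index?_isSome_iff route1 s).mpr hs1)
  obtain ⟨m, hm⟩ := Option.isSome_iff_exists.mp ((PySem.List.index?_isSome_iff route1 t).mpr ht1)
  obtain ⟨ks, hks⟩ := Option.isSome_iff_exists.mp ((PySem.List.index?_isSome_iff route2 s).mpr hs2)
  obtain ⟨ms, hms⟩ := Option.isSome_iff_exists.mp ((PySem.List.index?_isSome_iff route2 t).mpr ht2)
  obtain ⟨hklt, hkeq, -⟩ := PySem.List.getElem_of_index?_eq_some hk
  obtain ⟨hmlt, hmeq, -⟩ := PySem.List.getElem_of_index?_eq_some hm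
  constructor
  · intro h
    rcases pvFold_mem _ _ _ _ _ h with hempty | ⟨-, hP⟩
    · rw [PySem.Dict.get?_empty] at hempty; cases hempty
    · simp only [pvSuccP, pvFirstIdx_getD, hk, hm, hks, hms, Option.getD_some,
        Bool.and_eq_true, beq_iff_eq] at hP
      simp only [pvCond, hk, hm, hks, hms, Option.getD_some, Bool.and_eq_true, beq_iff_eq]
      omega
  · intro h
    simp only [pvCond, hk, hm, hks, hms, Option.getD_some, Bool.and_eq_true, beq_iff_eq] at h
    have hmk : m = k + 1 := by omega
    have hpair : (s, t) ∈ route1.zip (route1.drop 1) := by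
      have hlt : k + 1 < route1.length := hmk ▸ hmlt
      have := pvMemZipDrop route1 k hlt
      rw [hkeq] at this
      have ht' : route1[k + 1] = t := by
        have : route1[m] = t := hmeq
        simpa [hmk] using this
      rwa [ht'] at this
    have hP : pvSuccP (pvFirstIdx route1) (pvFirstIdx route2) (s, t) = true := by
      simp only [pvSuccP, pvFirstIdx_getD, pvFirstIdx_contains, hk, hm, hks, hms,
        Option.getD_some, Bool.and_eq_true, beq_iff_eq]
      refine ⟨⟨⟨?_, ?_⟩, by omega⟩, by omega⟩ <;> simp [hs2, ht2]
    refine pvFold_some _ _ _ _ _ hpair hP ?_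
    intro u humem hPu
    have hu1 : u ∈ route1 := List.mem_of_mem_drop (List.of_mem_zip humem).2
    obtain ⟨mu, hmu⟩ := Option.isSome_iff_exists.mp ((PySem.List.index?_isSome_iff route1 u).mpr hu1)
    simp only [pvSuccP, pvFirstIdx_getD, hk, hmu, Option.getD_some,
      Bool.and_eq_true, beq_iff_eq] at hPu
    have hmum : mu = m := by omega
    obtain ⟨hmult, hmueq, -⟩ := PySem.List.getElem_of_index?_eq_some hmu
    rw [← hmueq, ← hmeq]
    congr 1

-- ---- A's loop collects pvPairs of the suffix ----
theorem pvALoop_eq (route1 route2 sub : List Int) (i : Nat) (acc : List (List Int)) :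
    pvALoop route1 route2 sub i acc = acc ++ pvPairs route1 route2 (sub.drop i) := by
  by_cases h : i < sub.length
  · by_cases h2 : sub.length ≤ i + 1
    · rw [pvALoop, if_pos h, if_pos h2]
      have hd : sub.drop (i + 1) = [] := List.drop_eq_nil_of_le h2
      rw [List.drop_eq_getElem_cons h, hd]
      simp [pvPairs]
    · rw [not_le] at h2
      have hx : PySem.List.pyGetD sub (i : Int) 0 = sub[i] := by
        rw [PySem.List.pyGetD_eq_getElem sub 0 (by positivity) (by exact_mod_cast h)]
        simp
      have hy : PySem.List.pyGetD sub ((i : Int) + 1) 0 = sub[i + 1] := by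
        rw [show ((i : Int) + 1) = ((i + 1 : Nat) : Int) by push_cast; ring]
        rw [PySem.List.pyGetD_eq_getElem sub 0 (by positivity) (by exact_mod_cast h2)]
        simp
      have hdrop : sub.drop i = sub[i] :: sub[i + 1] :: sub.drop (i + 2) := by
        rw [List.drop_eq_getElem_cons h, List.drop_eq_getElem_cons h2]
      have hdrop1 : sub.drop (i + 1) = sub[i + 1] :: sub.drop (i + 2) := List.drop_eq_getElem_cons h2
      have hrec := pvALoop_eq route1 route2 sub (i + 1)
      rw [pvALoop, if_pos h, if_neg (by omega)]
      simp only [hx, hy]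
      rw [hdrop]
      by_cases hc : ((((PySem.List.index? route1 sub[i + 1]).getD 0 : Nat) : Int) - (((PySem.List.index? route1 sub[i]).getD 0 : Nat) : Int) == 1) &&
          ((((PySem.List.index? route2 sub[i + 1]).getD 0 : Nat) : Int) - (((PySem.List.index? route2 sub[i]).getD 0 : Nat) : Int) == 1)
      · have hcc : pvCond route1 route2 sub[i] sub[i + 1] = true := hc
        rw [if_pos hc, hrec, hdrop1]
        simp [pvPairs, hcc, List.append_assoc]
      · have hcc : pvCond route1 route2 sub[i] sub[i + 1] = false := by
          rw [Bool.eq_false_iff]; exact hc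
        rw [if_neg hc, hrec, hdrop1]
        simp [pvPairs, hcc]

  · rw [pvALoop, if_neg h, List.drop_eq_nil_of_le (by omega)]
    simp [pvPairs]
termination_by sub.length - i

-- ---- B's streaming fold computes pvChain of the filtered list ----
theorem pvStream_eq (succ : PySem.Dict Int Int) (common : Int → Bool) (l : List Int)
    (acc : List (List Int)) (prev : Option Int) :
    (l.foldl
        (fun st s =>
          if common s then
            (st.1 ++ (match st.2 with
              | some p => if succ.get? p == some s then [[p, s]] else []
              | none => []), some s)
          else st) (acc, prev)).1
      = acc ++ pvChain succ prev (l.filter common) := by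
  induction l generalizing acc prev with
  | nil => simp [pvChain]
  | cons x xs ih =>
    rw [List.foldl_cons, List.filter_cons]
    by_cases hc : common x
    · rw [if_pos hc, if_pos hc, ih]
      show _ = acc ++ pvChain succ prev (x :: xs.filter common)
      simp only [pvChain]
      rw [List.append_assoc]
    · rw [if_neg hc, if_neg (by simpa using hc), ih]

-- ---- on lists of common elements the chain equals A's pairs ----
theorem pvChain_some_eq (route1 route2 : List Int) (l : List Int) (p : Int)
    (hp : p ∈ route1 ∧ p ∈ route2) (hl : ∀ x ∈ l, x ∈ route1 ∧ x ∈ route2) :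
    pvChain (pvSucc (pvFirstIdx route1) (pvFirstIdx route2) route1) (some p) l
      = pvPairs route1 route2 (p :: l) := by
  induction l generalizing p with
  | nil => simp [pvChain, pvPairs]
  | cons x xs ih =>
    have hx := hl x (List.mem_cons_self ..)
    have hb : ((pvSucc (pvFirstIdx route1) (pvFirstIdx route2) route1).get? p == some x)
        = pvCond route1 route2 p x := by
      by_cases hc : pvCond route1 route2 p x = true
      · rw [hc, beq_iff_eq.mpr ((pvSucc_get? route1 route2 p x hp.1 hp.2 hx.1 hx.2).mpr hc)]
      · rw [Bool.eq_false_iff.mpr hc, beq_eq_false_iff_ne]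
        intro hsome
        exact hc ((pvSucc_get? route1 route2 p x hp.1 hp.2 hx.1 hx.2).mp hsome)
    simp only [pvChain, pvPairs, hb]
    rw [ih x hx (fun y hy => hl y (List.mem_cons_of_mem _ hy))]

theorem pvChain_none_eq (route1 route2 : List Int) (l : List Int)
    (hl : ∀ x ∈ l, x ∈ route1 ∧ x ∈ route2) :
    pvChain (pvSucc (pvFirstIdx route1) (pvFirstIdx route2) route1) none l
      = pvPairs route1 route2 l := by
  cases l with
  | nil => rfl
  | cons x xs =>
    have hx := hl x (List.mem_cons_self ..)
    simp only [pvChain]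
    rw [pvChain_some_eq route1 route2 xs x hx (fun y hy => hl y (List.mem_cons_of_mem _ hy))]
    simp

-- ===== VERDICT (by name: the statement is the Claim_ definition above) =====
theorem get_same_sub_route_spec : Claim_equal_get_same_sub_route := by
  intro route1 route2 _
  unfold Spec_get_same_sub_route get_same_sub_route get_same_sub_route_alt
  rw [PySem.List.foldl_append_if_eq_filter (fun s => route2.contains s) route1 [], List.nil_append,
    pvALoop_eq, List.drop_zero, List.nil_append]
  simp only [pvStream_eq, List.nil_append]
  have hfc : route1.filter (fun s => (pvFirstIdx route2).contains s)
      = route1.filter (fun s => route2.contains s) := by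
    apply List.filter_congr
    intro s _
    rw [pvFirstIdx_contains]
  rw [hfc, pvChain_none_eq]
  intro x hx
  have hm := List.mem_filter.mp hx
  exact ⟨hm.1, by simpa using hm.2⟩
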